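-- pv_equiv track=rewrite | github.com/MichalOrzolek/modeling | Python/list_of_names.py | insert_delimiter
-- ===== SOURCE A (Python) =====
-- def insert_delimiter(text):
--     result = []
--     in_parentheses = False
--     for i in range(len(text) - 1):
--         result.append(text[i])
--         if text[i] == '(':
--             in_parentheses = True
--         elif text[i] == ')':
--             in_parentheses = False
--         elif not in_parentheses and text[i].islower() and text[i + 1].isupper():
--             result.append('; ')
--     result.append(text[-1])
--     return ''.join(result)
-- ===== SOURCE B (Python) =====
-- def insert_delimiter(text):
--     # Phase 1: tokenize into paren tokens and maximal paren-free runs.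
--     segs = []
--     cur = []
--     for c in text:
--         if c == '(' or c == ')':
--             if cur:
--                 segs.append(''.join(cur))
--             segs.append(c)
--             cur = []
--         else:
--             cur.append(c)
--     if cur:
--         segs.append(''.join(cur))
--     # Phase 2: walk the segments, recomputing the inside-parentheses flag;
--     # inside runs are copied verbatim, outside runs get '; ' at lower/upper pairs.
--     out = []
--     inside = False
--     for s in segs:
--         if s == '(':
--             inside = True
--             out.append(s)
--         elif s == ')':
--             inside = False
--             out.append(s)
--         elif inside:
--             out.append(s)
--         else:
--             buf = []
--             for a, b in zip(s, s[1:]):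
--                 buf.append(a)
--                 if a.islower() and b.isupper():
--                     buf.append('; ')
--             buf.append(s[-1])
--             out.append(''.join(buf))
--     return ''.join(out)
-- ===== Notes on version B (the rewrite author's own statement) =====
-- stated objective: alternative
-- what changed: B first tokenizes the string into paren tokens and maximal paren-free runs, then renders segments (inside runs verbatim, outside runs with pairwise '; ' insertion), instead of A's single indexed loop carrying a mutable paren flag per character.
import Mathlib
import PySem

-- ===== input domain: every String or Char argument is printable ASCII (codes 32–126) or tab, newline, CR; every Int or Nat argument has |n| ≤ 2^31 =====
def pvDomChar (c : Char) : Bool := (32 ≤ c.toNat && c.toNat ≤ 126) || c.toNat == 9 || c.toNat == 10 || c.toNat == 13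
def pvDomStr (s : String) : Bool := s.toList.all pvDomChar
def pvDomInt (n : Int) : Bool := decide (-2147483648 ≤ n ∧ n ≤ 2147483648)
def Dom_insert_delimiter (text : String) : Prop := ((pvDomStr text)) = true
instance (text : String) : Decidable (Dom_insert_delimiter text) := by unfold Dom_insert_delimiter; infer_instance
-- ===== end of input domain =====

-- B re-implements A by tokenizing into paren tokens and paren-free runs, then rendering the
-- segments (alternative decomposition, same cost); Pre_ excludes only the empty string,
-- on which A raises IndexError (B happens to return "" there).

-- ===== PORT A =====
-- loop body of A's 'for i in range(len(text) - 1)', iterating over the pairs (text[i], text[i+1])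
def pvAStep (st : List String × Bool) (cd : Char × Char) : List String × Bool :=
  let result := st.1 ++ [String.ofList [cd.1]]
  if cd.1 = '(' then (result, true)
  else if cd.1 = ')' then (result, false)
  else if !st.2 && PySem.Chars.islower cd.1 && PySem.Chars.isupper cd.2 then
    (result ++ ["; "], st.2)
  else (result, st.2)

def insert_delimiter (text : String) : String :=
  let cs := text.toList
  let st := (cs.zip cs.tail).foldl pvAStep ([], false)
  -- text[-1]: Python raises IndexError on "", which Pre_insert_delimiter excludes
  PySem.Str.join "" (st.1 ++ [match PySem.List.pyGet? cs (-1) with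
    | some c => String.ofList [c]
    | none => ""])

-- ===== PORT B =====
inductive PVSeg
  | paren : Char → PVSeg
  | run : List Char → PVSeg
deriving DecidableEq, Repr

-- tokenizing loop body: collect paren-free runs, emit parens as their own tokens
def pvTokStep (st : List PVSeg × List Char) (c : Char) : List PVSeg × List Char :=
  if c = '(' || c = ')' then
    ((st.1 ++ (if st.2 = [] then [] else [PVSeg.run st.2])) ++ [PVSeg.paren c], [])
  else (st.1, st.2 ++ [c])

-- inner loop of the outside-run transformation: 'for a, b in zip(s, s[1:])'
def pvBufStep (b : List String) (cd : Char × Char) : List String :=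
  let b := b ++ [String.ofList [cd.1]]
  if PySem.Chars.islower cd.1 && PySem.Chars.isupper cd.2 then b ++ ["; "] else b

-- rendering loop body: parens flip the flag, inside runs verbatim, outside runs transformed
def pvRenderStep (st : List String × Bool) (sg : PVSeg) : List String × Bool :=
  match sg with
  | PVSeg.paren c => (st.1 ++ [String.ofList [c]], c == '(')
  | PVSeg.run r =>
    if st.2 then (st.1 ++ [String.ofList r], st.2)
    else
      let buf := (r.zip r.tail).foldl pvBufStep []
      let buf := buf ++ [match PySem.List.pyGet? r (-1) with
        | some c => String.ofList [c]
        | none => ""]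
      (st.1 ++ [PySem.Str.join "" buf], st.2)

def insert_delimiter_alt (text : String) : String :=
  let cs := text.toList
  let st := cs.foldl pvTokStep ([], [])
  let segs := st.1 ++ (if st.2 = [] then [] else [PVSeg.run st.2])
  PySem.Str.join "" (segs.foldl pvRenderStep ([], false)).1

-- ===== PRECONDITION & SPEC =====
-- Pre_ excludes only the empty string, on which A raises IndexError (text[-1]).
def Pre_insert_delimiter (text : String) : Prop := text ≠ ""
instance (text : String) : Decidable (Pre_insert_delimiter text) := by unfold Pre_insert_delimiter; infer_instance
def pvWitness_insert_delimiter : String := "aB"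


def Spec_insert_delimiter (text : String) (out : String) : Prop := out = insert_delimiter_alt text
instance (text : String) (out : String) : Decidable (Spec_insert_delimiter text out) := by unfold Spec_insert_delimiter; infer_instance

-- ===== CLAIM (what is proved, stated in full; the proofs are below) =====
def Claim_equal_insert_delimiter : Prop := ∀ (text : String), Dom_insert_delimiter text → Pre_insert_delimiter text → Spec_insert_delimiter text (insert_delimiter text)

-- ===== LEMMAS AND PROOFS =====

-- flatten a list of string pieces to the character level
def pvToL (L : List String) : List Char := (L.map String.toList).flatten

-- characterization of A's whole computation at the character level
def pvCharsA : Bool → List Char → List Char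
  | _, [] => []
  | _, [c] => [c]
  | inp, c :: d :: t =>
    if c = '(' then c :: pvCharsA true (d :: t)
    else if c = ')' then c :: pvCharsA false (d :: t)
    else if !inp && PySem.Chars.islower c && PySem.Chars.isupper d then
      c :: ';' :: ' ' :: pvCharsA inp (d :: t)
    else c :: pvCharsA inp (d :: t)

-- characterization of B's outside-run transformation
def pvPins : List Char → List Char
  | [] => []
  | [c] => [c]
  | c :: d :: t =>
    if PySem.Chars.islower c && PySem.Chars.isupper d then c :: ';' :: ' ' :: pvPins (d :: t)
    else c :: pvPins (d :: t)

def pvRunOpt (cur : List Char) : List PVSeg := if cur = [] then [] else [PVSeg.run cur]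

-- recursive characterization of B's tokenizer
def pvTok : List Char → List Char → List PVSeg
  | cur, [] => pvRunOpt cur
  | cur, c :: t =>
    if c = '(' || c = ')' then pvRunOpt cur ++ PVSeg.paren c :: pvTok [] t
    else pvTok (cur ++ [c]) t

-- recursive characterization of B's renderer
def pvRender : Bool → List PVSeg → List Char
  | _, [] => []
  | _, PVSeg.paren c :: t => c :: pvRender (c == '(') t
  | inp, PVSeg.run r :: t => (if inp then r else pvPins r) ++ pvRender inp t

lemma pvToL_append (a b : List String) : pvToL (a ++ b) = pvToL a ++ pvToL b := by
  simp [pvToL]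

lemma pvToL_singleton (s : String) : pvToL [s] = s.toList := by simp [pvToL]

lemma pvJoin_nil (parts : List (List Char)) : PySem.Chars.join [] parts = parts.flatten := by
  induction parts with
  | nil => simp [PySem.Chars.join, List.intercalate]
  | cons p ps ih =>
    cases ps <;> simp_all [PySem.Chars.join, List.intercalate, List.intersperse]

lemma pvJoin_toL (L : List String) : (PySem.Str.join "" L).toList = pvToL L := by
  rw [PySem.Str.toList_join]
  simp [pvJoin_nil, pvToL]

-- A's fold, characterized
lemma pvA_fold (t : List Char) : ∀ (c : Char) (inp : Bool) (acc : List String),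
    pvToL ((((c :: t).zip t).foldl pvAStep (acc, inp)).1
      ++ [String.ofList [(c :: t).getLast (by simp)]])
      = pvToL acc ++ pvCharsA inp (c :: t) := by
  induction t with
  | nil =>
    intro c inp acc
    simp [pvToL_append, pvToL_singleton, pvCharsA]
  | cons d t ih =>
    intro c inp acc
    have hz : (c :: d :: t).zip (d :: t) = (c, d) :: ((d :: t).zip t) := by simp
    have hl : (c :: d :: t).getLast (by simp) = (d :: t).getLast (by simp) := by
      simp [List.getLast]
    rw [hz, List.foldl_cons, hl]
    by_cases h1 : c = '('
    · rw [show pvAStep (acc, inp) (c, d) = (acc ++ [String.ofList [c]], true) from by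
        simp [pvAStep, h1]]
      rw [ih d true (acc ++ [String.ofList [c]])]
      simp [pvCharsA, h1, pvToL_append, pvToL_singleton]
    · by_cases h2 : c = ')'
      · rw [show pvAStep (acc, inp) (c, d) = (acc ++ [String.ofList [c]], false) from by
          simp [pvAStep, h2]]
        rw [ih d false (acc ++ [String.ofList [c]])]
        simp [pvCharsA, h2, pvToL_append, pvToL_singleton]
      · by_cases h3 : (!inp && PySem.Chars.islower c && PySem.Chars.isupper d) = true
        · rw [show pvAStep (acc, inp) (c, d)
              = (acc ++ [String.ofList [c]] ++ ["; "], inp) from by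
            simp [pvAStep, h1, h2, h3]]
          rw [ih d inp (acc ++ [String.ofList [c]] ++ ["; "])]
          have h3l : ("; " : String).toList = [';', ' '] := by decide
          simp [pvCharsA, pvToL, h1, h2, h3, h3l]
        · rw [show pvAStep (acc, inp) (c, d) = (acc ++ [String.ofList [c]], inp) from by
            simp [pvAStep, h1, h2]
            intro ha hb
            simp [ha, hb] at h3
            exact h3]
          rw [ih d inp (acc ++ [String.ofList [c]])]
          simp [pvCharsA, h1, h2, h3, pvToL_append, pvToL_singleton]

-- B's tokenizing fold, characterized
lemma pvTok_fold (cs : List Char) : ∀ (segs : List PVSeg) (cur : List Char),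
    (cs.foldl pvTokStep (segs, cur)).1
      ++ pvRunOpt (cs.foldl pvTokStep (segs, cur)).2
      = segs ++ pvTok cur cs := by
  induction cs with
  | nil => intro segs cur; simp [pvTok, pvRunOpt]
  | cons c t ih =>
    intro segs cur
    rw [List.foldl_cons]
    by_cases h : (c = '(' || c = ')') = true
    · rw [show pvTokStep (segs, cur) c = ((segs ++ pvRunOpt cur) ++ [PVSeg.paren c], []) from by
        simp only [pvTokStep, h, if_true, pvRunOpt]]
      rw [ih ((segs ++ pvRunOpt cur) ++ [PVSeg.paren c]) []]
      have hrhs : pvTok cur (c :: t) = pvRunOpt cur ++ PVSeg.paren c :: pvTok [] t := by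
        simp only [pvTok, h, if_true]
      rw [hrhs]
      simp [List.append_assoc]
    · rw [show pvTokStep (segs, cur) c = (segs, cur ++ [c]) from by
        simp [pvTokStep, h]]
      rw [ih segs (cur ++ [c])]
      have hrhs : pvTok cur (c :: t) = pvTok (cur ++ [c]) t := by
        simp [pvTok, h]
      rw [hrhs]

-- B's inner buffer fold, characterized
lemma pvBuf_fold (t : List Char) : ∀ (c : Char) (acc : List String),
    pvToL ((((c :: t).zip t).foldl pvBufStep acc)
      ++ [String.ofList [(c :: t).getLast (by simp)]])
      = pvToL acc ++ pvPins (c :: t) := by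
  induction t with
  | nil => intro c acc; simp [pvToL_append, pvToL_singleton, pvPins]
  | cons d t ih =>
    intro c acc
    have hz : (c :: d :: t).zip (d :: t) = (c, d) :: ((d :: t).zip t) := by simp
    have hl : (c :: d :: t).getLast (by simp) = (d :: t).getLast (by simp) := by
      simp [List.getLast]
    rw [hz, List.foldl_cons, hl]
    by_cases h : (PySem.Chars.islower c && PySem.Chars.isupper d) = true
    · rw [show pvBufStep acc (c, d) = acc ++ [String.ofList [c]] ++ ["; "] from by
        simp [pvBufStep, h]]
      rw [ih d (acc ++ [String.ofList [c]] ++ ["; "])]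
      have h3l : ("; " : String).toList = [';', ' '] := by decide
      simp [pvPins, pvToL, h, h3l]
    · rw [show pvBufStep acc (c, d) = acc ++ [String.ofList [c]] from by
        simp [pvBufStep, h]]
      rw [ih d (acc ++ [String.ofList [c]])]
      simp [pvPins, h, pvToL_append, pvToL_singleton]

-- the string an outside run renders to
lemma pvRun_chars (r : List Char) :
    (PySem.Str.join "" ((r.zip r.tail).foldl pvBufStep []
      ++ [match PySem.List.pyGet? r (-1) with
        | some c => String.ofList [c]
        | none => ""])).toList = pvPins r := by
  cases r with
  | nil => simp [pvJoin_toL, pvPins, PySem.List.pyGet?]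
  | cons c t =>
    rw [pvJoin_toL]
    have h : PySem.List.pyGet? (c :: t) (-1) = some ((c :: t).getLast (by simp)) := by
      rw [PySem.List.pyGet?_neg_one]
      exact List.getLast?_eq_some_getLast _
    rw [h]
    have := pvBuf_fold t c []
    simpa [pvToL] using this

-- B's rendering fold, characterized
lemma pvRender_fold (segs : List PVSeg) : ∀ (inp : Bool) (acc : List String),
    pvToL ((segs.foldl pvRenderStep (acc, inp)).1) = pvToL acc ++ pvRender inp segs := by
  induction segs with
  | nil => intro inp acc; simp [pvRender]
  | cons sg t ih =>
    intro inp acc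
    rw [List.foldl_cons]
    cases sg with
    | paren c =>
      rw [show pvRenderStep (acc, inp) (PVSeg.paren c)
          = (acc ++ [String.ofList [c]], c == '(') from rfl]
      rw [ih (c == '(') (acc ++ [String.ofList [c]])]
      simp [pvRender, pvToL_append, pvToL_singleton]
    | run r =>
      cases inp with
      | true =>
        rw [show pvRenderStep (acc, true) (PVSeg.run r)
            = (acc ++ [String.ofList r], true) from by simp [pvRenderStep]]
        rw [ih true (acc ++ [String.ofList r])]
        simp [pvRender, pvToL_append, pvToL_singleton]
      | false =>
        rw [show pvRenderStep (acc, false) (PVSeg.run r)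
            = (acc ++ [PySem.Str.join "" ((r.zip r.tail).foldl pvBufStep []
                ++ [match PySem.List.pyGet? r (-1) with
                  | some c => String.ofList [c]
                  | none => ""])], false) from by simp [pvRenderStep]]
        rw [ih false _]
        rw [pvToL_append, pvToL_singleton, pvRun_chars]
        simp [pvRender]

def pvNoParen (r : List Char) : Prop := ∀ c ∈ r, c ≠ '(' ∧ c ≠ ')'

lemma pvParen_not_upper {p : Char} (h : p = '(' ∨ p = ')') :
    PySem.Chars.isupper p = false := by
  rcases h with h | h <;> subst h <;> decide

lemma pvCharsA_paren (inp : Bool) (c : Char) (t : List Char) (h : c = '(' ∨ c = ')') :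
    pvCharsA inp (c :: t) = c :: pvCharsA (c == '(') t := by
  cases t with
  | nil => rcases h with h | h <;> subst h <;> simp [pvCharsA]
  | cons d t => rcases h with h | h <;> subst h <;> simp [pvCharsA]

lemma pvRunOut (r : List Char) : ∀ (s : List Char), pvNoParen r →
    (s = [] ∨ ∃ p t, s = p :: t ∧ (p = '(' ∨ p = ')')) →
    pvCharsA false (r ++ s) = pvPins r ++ pvCharsA false s := by
  induction r with
  | nil => intro s _ _; simp [pvPins]
  | cons c r ih =>
    intro s hnp hs
    cases r with
    | nil =>
      rcases hs with h | ⟨p, t, rfl, hp⟩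
      · subst h; simp [pvPins, pvCharsA]
      · have hc := hnp c (by simp)
        have hu : PySem.Chars.isupper p = false := pvParen_not_upper hp
        simp [pvCharsA, pvPins, hc.1, hc.2, hu]
    | cons d r' =>
      have hc := hnp c (by simp)
      have step : pvCharsA false (c :: d :: (r' ++ s))
          = (if PySem.Chars.islower c && PySem.Chars.isupper d then
              c :: ';' :: ' ' :: pvCharsA false (d :: (r' ++ s))
            else c :: pvCharsA false (d :: (r' ++ s))) := by
        simp [pvCharsA, hc.1, hc.2]
      have ih' := ih s (fun x hx => hnp x (by simp [hx])) hs
      show pvCharsA false (c :: d :: (r' ++ s)) = pvPins (c :: d :: r') ++ pvCharsA false s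
      rw [step]
      unfold pvPins
      split_ifs with h
      · exact congrArg (fun l => c :: ';' :: ' ' :: l) ih'
      · exact congrArg (fun l => c :: l) ih'

lemma pvRunIn (r : List Char) : ∀ (s : List Char), pvNoParen r →
    pvCharsA true (r ++ s) = r ++ pvCharsA true s := by
  induction r with
  | nil => intro s _; simp
  | cons c r ih =>
    intro s hnp
    have hc := hnp c (by simp)
    cases r with
    | nil =>
      cases s with
      | nil => simp [pvCharsA]
      | cons p t => simp [pvCharsA, hc.1, hc.2]
    | cons d r' =>
      have ih' := ih s (fun x hx => hnp x (by simp [hx])) 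
      show pvCharsA true (c :: d :: (r' ++ s)) = c :: d :: r' ++ pvCharsA true s
      simp [pvCharsA, hc.1, hc.2]
      exact ih'

-- main bridge: rendering B's tokens equals A's characterization
lemma pvMain (cs : List Char) : ∀ (cur : List Char) (inp : Bool), pvNoParen cur →
    pvRender inp (pvTok cur cs) = pvCharsA inp (cur ++ cs) := by
  induction cs with
  | nil =>
    intro cur inp hnp
    unfold pvTok pvRunOpt
    split_ifs with h
    · simp [h, pvRender, pvCharsA]
    · cases inp
      · have h1 := pvRunOut cur [] hnp (Or.inl rfl)
        simp [pvCharsA] at h1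
        simp [pvRender, h1]
      · have h1 := pvRunIn cur [] hnp
        simp [pvCharsA] at h1
        simp [pvRender, h1]
  | cons c t ih =>
    intro cur inp hnp
    unfold pvTok
    split_ifs with h
    · -- c is a paren
      have hpar : c = '(' ∨ c = ')' := by
        rcases Bool.or_eq_true_iff.mp h with h' | h' <;>
          [left; right] <;> exact decide_eq_true_iff.mp h'
      have hrend : pvRender inp (pvRunOpt cur ++ PVSeg.paren c :: pvTok [] t)
          = (if inp then cur else pvPins cur) ++ (c :: pvRender (c == '(') (pvTok [] t)) := by
        unfold pvRunOpt
        split_ifs <;> simp_all [pvRender, pvPins]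
      rw [hrend, ih [] (c == '(') (by intro x hx; simp at hx)]
      have hchars : pvCharsA inp (cur ++ c :: t)
          = (if inp then cur else pvPins cur) ++ (c :: pvCharsA (c == '(') t) := by
        cases inp
        · rw [pvRunOut cur (c :: t) hnp (Or.inr ⟨c, t, rfl, hpar⟩), pvCharsA_paren _ _ _ hpar]
          simp
        · rw [pvRunIn cur (c :: t) hnp, pvCharsA_paren _ _ _ hpar]
          simp
      rw [hchars]
      simp
    · -- c is not a paren
      have hc : c ≠ '(' ∧ c ≠ ')' := by
        constructor <;> intro hx <;> subst hx <;> simp at h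
      rw [ih (cur ++ [c]) inp (by
        intro x hx
        rcases List.mem_append.mp hx with hx | hx
        · exact hnp x hx
        · simp at hx; subst hx; exact hc)]
      simp

lemma pvA_chars (text : String) (h : text ≠ "") :
    (insert_delimiter text).toList = pvCharsA false text.toList := by
  unfold insert_delimiter
  cases hcs : text.toList with
  | nil => exact absurd (by simpa using congrArg String.ofList hcs) h
  | cons c t =>
    rw [pvJoin_toL]
    have hpg : PySem.List.pyGet? (c :: t) (-1) = some ((c :: t).getLast (by simp)) := by
      rw [PySem.List.pyGet?_neg_one]
      exact List.getLast?_eq_some_getLast _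
    simp only [hpg]
    have := pvA_fold t c false []
    simpa [pvToL] using this

lemma pvB_chars (text : String) :
    (insert_delimiter_alt text).toList = pvRender false (pvTok [] text.toList) := by
  unfold insert_delimiter_alt
  rw [pvJoin_toL]
  have htok := pvTok_fold text.toList [] []
  rcases hst : text.toList.foldl pvTokStep ([], []) with ⟨segs, cur⟩
  rw [hst] at htok
  simp only at htok ⊢
  have : segs ++ (if cur = [] then [] else [PVSeg.run cur]) = pvTok [] text.toList := by
    simpa [pvRunOpt] using htok
  rw [this]
  simpa using pvRender_fold (pvTok [] text.toList) false []

-- ===== VERDICT (by name: the statement is the Claim_ definition above) =====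
theorem insert_delimiter_spec : Claim_equal_insert_delimiter := by
  intro text _ hpre
  unfold Spec_insert_delimiter
  apply String.toList_inj.mp
  rw [pvA_chars text hpre, pvB_chars text]
  exact (pvMain text.toList [] false (by intro x hx; simp at hx)).symm
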